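-- pv_equiv track=rewrite | github.com/zellybobka/TeoryOfCoding_labs | Code_for_1_lab.py | generate_G
-- ===== SOURCE A (Python) =====
-- def generate_G(n, k):
--     """Генерируем порождающую матрицу G в систематическом виде [I_k | A]."""
--     r = n - k
--     if r < 2:  # Для исправления 1 ошибки требуется d=3, что требует r>=2
--         return None
--
--     # Генерация всех ненулевых двоичных векторов длины r
--     all_vectors = []
--     for i in range(1, 2 ** r):
--         vec = [int(bit) for bit in bin(i)[2:].zfill(r)]
--         all_vectors.append(vec)
--
--     # Исключение базисных векторов (с ровно одной единицей)
--     non_basis_vectors = []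
--     ones_per_row = [row.count(1) for row in all_vectors]
--     for i in range(len(ones_per_row)):
--         if ones_per_row[i] != 1:
--             non_basis_vectors.append(all_vectors[i])
--
--     # Формируем матрицу A (k x r), где каждая строка - выбранный вектор (до к)
--     A = non_basis_vectors[:k]
--     # Строим порождающую матрицу G = [I_k | A]
--     G = []
--     for i in range(k):
--         row = [0] * n
--         row[i] = 1  # Единичная часть
--         for j in range(r):
--             row[k + j] = A[i][j]  # Часть A
--         G.append(row)
--     return G
-- ===== SOURCE B (Python) =====
-- def generate_G(n, k):
--     """Systematic generator matrix [I_k | A] built directly: enumerate candidate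
--     integers in increasing order, skip powers of two (the weight-1 basis vectors),
--     and stop as soon as k rows are collected -- no materialisation of all 2^r vectors."""
--     r = n - k
--     if r < 2:  # d=3 needs r>=2
--         return None
--     limit = 2 ** r
--     G = []
--     i, p = 3, 4  # i: next candidate; p: next power of two (0,1,2 are excluded already)
--     ident = 0    # number of rows built so far = position of the 1 in the identity part
--     while ident < k:
--         if i >= limit:
--             raise IndexError("not enough non-basis vectors for k rows")
--         if i == p:
--             p *= 2
--         else:
--             row = [0] * k
--             row[ident] = 1
--             G.append(row + [int(b) for b in bin(i)[2:].zfill(r)])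
--             ident += 1
--         i += 1
--     return G
-- ===== Notes on version B (the rewrite author's own statement) =====
-- stated objective: alternative
-- what changed: Instead of materialising all 2^r binary vectors, counting their ones and filtering, B enumerates candidate integers upward from 3, skips powers of two (the weight-1 basis vectors) with a tracked next-power counter, and stops as soon as the k rows [e_ident | bits(i)] are built.
import Mathlib
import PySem

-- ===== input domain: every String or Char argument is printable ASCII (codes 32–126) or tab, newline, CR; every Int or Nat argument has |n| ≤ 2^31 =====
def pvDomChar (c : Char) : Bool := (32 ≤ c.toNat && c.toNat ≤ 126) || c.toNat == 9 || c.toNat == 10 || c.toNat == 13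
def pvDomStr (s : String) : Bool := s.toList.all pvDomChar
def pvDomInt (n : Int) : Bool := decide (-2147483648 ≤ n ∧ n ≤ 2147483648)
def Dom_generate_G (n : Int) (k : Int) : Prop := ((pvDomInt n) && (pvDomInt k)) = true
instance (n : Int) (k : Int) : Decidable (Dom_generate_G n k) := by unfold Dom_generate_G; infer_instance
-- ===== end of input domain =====

-- B enumerates candidate integers once, skipping powers of two, and stops after k rows,
-- instead of materialising and filtering all 2^r binary vectors (objective: alternative).


-- ===== PORT A =====

-- bin(i)[2:] for i ≥ 0 — the binary digits of i, most significant first, already as ints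
-- (exact for the i ≥ 1 produced by range(1, 2**r): no sign character appears)
def pybin (i : Nat) : List Int :=
  if h : i = 0 then [] else pybin (i / 2) ++ [((i % 2 : Nat) : Int)]
decreasing_by exact Nat.div_lt_self (Nat.pos_of_ne_zero h) one_lt_two

-- [int(bit) for bit in bin(i)[2:].zfill(r)] — zfill left-pads with '0' to width r
def padbits (r : Nat) (i : Nat) : List Int :=
  List.replicate (r - (pybin i).length) 0 ++ pybin i

def generate_G (n : Int) (k : Int) : Option (List (List Int)) :=
  let r := n - k
  if r < 2 then
    none
  else
    -- here r ≥ 2, so 2 ** r = 2 ^ r.toNat and i ≥ 1 in the range, exactly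
    let allVectors := (PySem.List.pyRange 1 ((2 : Int) ^ r.toNat)).map
      (fun i => padbits r.toNat i.toNat)
    let onesPerRow := allVectors.map (fun row => PySem.List.count row 1)
    let nonBasis := (PySem.List.pyRange 0 (onesPerRow.length : Int)).foldl
      (fun acc i =>
        if PySem.List.pyGetD onesPerRow i 0 ≠ 1 then
          acc ++ [PySem.List.pyGetD allVectors i []]
        else acc) []
    let Amat := PySem.List.slice nonBasis none (some k)
    (PySem.List.pyRange 0 k).foldl
      (fun acc? i =>
        acc?.bind (fun acc =>
          -- row = [0] * n; row[i] = 1  (raises only outside the reached domain)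
          (PySem.List.pySet? (List.replicate n.toNat (0 : Int)) i 1).bind (fun row =>
            -- A[i] — IndexError (none) when k exceeds the number of non-basis vectors
            (PySem.List.pyGet? Amat i).bind (fun ai =>
              ((PySem.List.pyRange 0 r).foldl
                (fun row? j =>
                  row?.bind (fun row =>
                    (PySem.List.pyGet? ai j).bind (fun v =>
                      PySem.List.pySet? row (k + j) v))) (some row)).bind (fun row =>
                some (acc ++ [row]))))))
      (some [])

-- ===== PORT B =====

-- while ident < k: skip i when it is the tracked power of two p, else emit row ident;
-- none models the IndexError raised when the candidates are exhausted (i reaches limit)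
def genRows (r limit : Nat) (k : Int) (i p ident : Nat) (acc : List (List Int)) :
    Option (List (List Int)) :=
  if (ident : Int) < k then
    if h : limit ≤ i then none
    else if i = p then
      genRows r limit k (i + 1) (p * 2) ident acc
    else
      -- row = [0]*k; row[ident] = 1 (in range: ident < k); append row + bits of i
      genRows r limit k (i + 1) p (ident + 1)
        (acc ++ [(List.replicate k.toNat (0 : Int)).set ident 1 ++ padbits r i])
  else
    some acc
termination_by limit - i
decreasing_by all_goals omega

def generate_G_alt (n : Int) (k : Int) : Option (List (List Int)) :=
  let r := n - k
  if r < 2 then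
    none
  else
    -- limit = 2 ** r (r ≥ 2 here); i starts at 3, next power of two p = 4
    genRows r.toNat (2 ^ r.toNat) k 3 4 0 []

-- ===== PRECONDITION & SPEC =====

-- Pre_ excludes exactly the inputs where A raises IndexError (B raises there too):
-- k exceeds the number (2^r - 1 - r) of available non-basis vectors of length r = n - k.
def Pre_generate_G (n : Int) (k : Int) : Prop :=
  n - k < 2 ∨ k ≤ 2 ^ (n - k).toNat - 1 - (n - k)
instance (n : Int) (k : Int) : Decidable (Pre_generate_G n k) := by
  unfold Pre_generate_G; infer_instance

def pvWitness_generate_G : Int × Int := (7, 4)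

def Spec_generate_G (n : Int) (k : Int) (out : Option (List (List Int))) : Prop :=
  out = generate_G_alt n k
instance (n : Int) (k : Int) (out : Option (List (List Int))) : Decidable (Spec_generate_G n k out) := by
  unfold Spec_generate_G; infer_instance

-- ===== CLAIM (what is proved, stated in full; the proofs are below) =====
def Claim_equal_generate_G : Prop := ∀ (n : Int) (k : Int), Dom_generate_G n k →
  Pre_generate_G n k → Spec_generate_G n k (generate_G n k)

-- ===== LEMMAS AND PROOFS =====

theorem pybin_zero : pybin 0 = [] := by rw [pybin]; simp

theorem pybin_ne_zero {m : Nat} (h : m ≠ 0) :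
    pybin m = pybin (m / 2) ++ [((m % 2 : Nat) : Int)] := by
  rw [pybin]; simp [h]

-- every positive number has a 1 somewhere in its binary digits
theorem pybin_count_pos : ∀ m, 1 ≤ m → 1 ≤ List.count (1 : Int) (pybin m) := by
  intro m
  induction m using Nat.strong_induction_on with
  | _ m ih =>
    intro hm
    rw [pybin_ne_zero (by omega)]
    rcases Nat.lt_or_ge m 2 with h2 | h2
    · interval_cases m
      · simp [pybin_zero]
    · have hd : 1 ≤ m / 2 := by omega
      have := ih (m / 2) (by omega) hd
      simp [List.count_append]
      omega

-- the binary digits contain exactly one 1 iff the number is a power of two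
theorem pybin_count_one_iff : ∀ m, 1 ≤ m →
    (List.count (1 : Int) (pybin m) = 1 ↔ ∃ j, m = 2 ^ j) := by
  intro m
  induction m using Nat.strong_induction_on with
  | _ m ih =>
    intro hm
    rcases Nat.lt_or_ge m 2 with h2 | h2
    · interval_cases m
      constructor
      · intro _; exact ⟨0, rfl⟩
      · intro _
        rw [pybin_ne_zero (by omega : (1 : Nat) ≠ 0)]
        simp [pybin_zero]
    · have hd : 1 ≤ m / 2 := by omega
      have IH := ih (m / 2) (by omega) hd
      rw [pybin_ne_zero (by omega), List.count_append]
      rcases Nat.even_or_odd m with he | ho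
      · have hm2 : m % 2 = 0 := Nat.even_iff.mp he
        rw [hm2]
        have hc0 : List.count (1 : Int) [((0 : Nat) : Int)] = 0 := by decide
        rw [hc0, Nat.add_zero, IH]
        constructor
        · rintro ⟨j, hj⟩
          exact ⟨j + 1, by rw [pow_succ]; omega⟩
        · rintro ⟨j, hj⟩
          rcases j with _ | j'
          · omega
          · exact ⟨j', by rw [pow_succ] at hj; omega⟩
      · have hm2 : m % 2 = 1 := Nat.odd_iff.mp ho
        rw [hm2]
        have hc1 : List.count (1 : Int) [((1 : Nat) : Int)] = 1 := by decide
        rw [hc1]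
        have hpos := pybin_count_pos (m / 2) hd
        constructor
        · intro h; omega
        · rintro ⟨j, hj⟩
          rcases j with _ | j'
          · omega
          · rw [pow_succ] at hj; omega

theorem pybin_length_le : ∀ t m, m < 2 ^ t → (pybin m).length ≤ t := by
  intro t
  induction t with
  | zero => intro m h; interval_cases m; simp [pybin_zero]
  | succ t ih =>
    intro m h
    by_cases h0 : m = 0
    · simp [h0, pybin_zero]
    · rw [pybin_ne_zero h0]
      have := ih (m / 2) (by omega)
      simp; omega

theorem padbits_length {R m : Nat} (h : m < 2 ^ R) : (padbits R m).length = R := by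
  have := pybin_length_le R m h
  simp [padbits]; omega

theorem padbits_count (R m : Nat) :
    List.count (1 : Int) (padbits R m) = List.count (1 : Int) (pybin m) := by
  simp [padbits, List.count_append, List.count_replicate]

-- the candidate numbers from i up to 2^R, with the single-one (power-of-two) ones removed
def csList (R i : Nat) : List Nat :=
  (List.range' i (2 ^ R - i)).filter (fun m => decide (PySem.List.count (padbits R m) 1 ≠ 1))

-- reference builder: consume the next `need` candidates, emitting row `ident`, `ident+1`, …
def buildFrom (R K ident : Nat) (l : List Nat) (need : Nat) (acc : List (List Int)) :
    Option (List (List Int)) :=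
  match need, l with
  | 0, _ => some acc
  | _ + 1, [] => none
  | need' + 1, m :: l' =>
      buildFrom R K (ident + 1) l' need'
        (acc ++ [(List.replicate K (0 : Int)).set ident 1 ++ padbits R m])

theorem foldl_bind_none {β : Type} (l : List Int) (F : Int → β → Option β) :
    l.foldl (fun a? i => a?.bind (F i)) none = none := by
  induction l with
  | nil => rfl
  | cons x l ih => simpa using ih

theorem write_loop (k : Int) (hk : 0 ≤ k) (ai : List Int) :
    ∀ (d a : Nat) (u w : List Int), a + d = ai.length → u.length = k.toNat + a →
      w.length = d →
    (PySem.List.pyRange (a : Int) (ai.length : Int)).foldl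
      (fun row? j =>
        row?.bind (fun row =>
          (PySem.List.pyGet? ai j).bind (fun v =>
            PySem.List.pySet? row (k + j) v))) (some (u ++ w))
      = some (u ++ ai.drop a) := by
  intro d
  induction d with
  | zero =>
    intro a u w hlen hu hw
    rw [PySem.List.pyRange_one_eq_nil (by omega)]
    have hw0 : w = [] := List.eq_nil_of_length_eq_zero hw
    have hdrop : ai.drop a = [] := List.drop_eq_nil_of_le (by omega)
    simp [hw0, hdrop]
  | succ d ihd =>
    intro a u w hlen hu hw
    have ha : a < ai.length := by omega
    rw [PySem.List.pyRange_one_cons (by omega), List.foldl_cons]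
    have hget : PySem.List.pyGet? ai (a : Int) = some ai[a] := by
      rw [PySem.List.pyGet?_natCast]; exact List.getElem?_eq_getElem ha
    obtain ⟨w0, w', rfl⟩ : ∃ w0 w', w = w0 :: w' := by
      cases w with
      | nil => simp at hw
      | cons w0 w' => exact ⟨w0, w', rfl⟩
    have hidx : k + (a : Int) = ((u.length : Nat) : Int) := by omega
    have hset : PySem.List.pySet? (u ++ w0 :: w') (k + (a : Int)) ai[a]
        = some (u ++ ai[a] :: w') := by
      rw [hidx, PySem.List.pySet?_natCast _ _ _ (by simp)]
      congr 1
      simp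
    rw [Option.bind_some, hget, Option.bind_some, hset]
    have hcast : (a : Int) + 1 = ((a + 1 : Nat) : Int) := by push_cast; ring
    rw [hcast]
    have := ihd (a + 1) (u ++ [ai[a]]) w' (by omega) (by simp [hu]; omega) (by simpa using hw)
    rw [show u ++ ai[a] :: w' = (u ++ [ai[a]]) ++ w' by simp, this]
    rw [List.drop_eq_getElem_cons ha]
    simp

-- the A-side row loop, reading from Amat = (map padbits of l).take K, equals buildFrom
theorem a_rows_loop (k n : Int) (hk : 1 ≤ k) (R : Nat)
    (hn : n.toNat = k.toNat + R) (l : List Nat)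
    (hl : ∀ m ∈ l, (padbits R m).length = R) :
    ∀ (d t : Nat) (acc : List (List Int)), d = k.toNat - t → t ≤ k.toNat →
    (PySem.List.pyRange (t : Int) k).foldl
      (fun acc? i =>
        acc?.bind (fun acc =>
          (PySem.List.pySet? (List.replicate n.toNat (0 : Int)) i 1).bind (fun row =>
            (PySem.List.pyGet? ((l.map (padbits R)).take k.toNat) i).bind (fun ai =>
              ((PySem.List.pyRange 0 (R : Int)).foldl
                (fun row? j =>
                  row?.bind (fun row =>
                    (PySem.List.pyGet? ai j).bind (fun v =>
                      PySem.List.pySet? row (k + j) v))) (some row)).bind (fun row =>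
                some (acc ++ [row]))))))
      (some acc)
      = buildFrom R k.toNat t (l.drop t) (k.toNat - t) acc := by
  intro d
  induction d with
  | zero =>
    intro t acc hd ht
    rw [PySem.List.pyRange_one_eq_nil (show k ≤ (t : Int) by omega)]
    rw [show k.toNat - t = 0 by omega]
    rfl
  | succ d ihd =>
    intro t acc hd ht
    have htk : t < k.toNat := by omega
    rw [PySem.List.pyRange_one_cons (show (t : Int) < k by omega), List.foldl_cons,
      Option.bind_some]
    have hset1 : PySem.List.pySet? (List.replicate n.toNat (0 : Int)) (t : Int) 1
        = some ((List.replicate n.toNat (0 : Int)).set t 1) := by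
      exact PySem.List.pySet?_natCast _ _ _ (by simp; omega)
    rw [hset1, Option.bind_some]
    by_cases hTL : t < l.length
    · have hAmat : PySem.List.pyGet? ((l.map (padbits R)).take k.toNat) (t : Int)
          = some (padbits R l[t]) := by
        rw [PySem.List.pyGet?_natCast]
        rw [List.getElem?_take]
        simp [htk, List.getElem?_eq_getElem hTL]
      rw [hAmat, Option.bind_some]
      have hai : (padbits R l[t]).length = R := hl _ (List.getElem_mem hTL)
      have hrow : (List.replicate n.toNat (0 : Int)).set t 1
          = ((List.replicate k.toNat (0 : Int)).set t 1) ++ List.replicate R (0 : Int) := by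
        rw [hn, List.replicate_add, List.set_append]
        simp [htk]
      have hw := write_loop k (by omega) (padbits R l[t]) R 0
        ((List.replicate k.toNat (0 : Int)).set t 1) (List.replicate R (0 : Int))
        (by omega) (by simp) (by simp)
      rw [hrow]
      rw [hai] at hw
      simp only [Nat.cast_zero, List.drop_zero] at hw
      rw [hw, Option.bind_some]
      rw [show (t : Int) + 1 = ((t + 1 : Nat) : Int) by push_cast; ring]
      rw [ihd (t + 1) _ (by omega) (by omega)]
      rw [List.drop_eq_getElem_cons hTL]
      rw [show k.toNat - t = (k.toNat - (t + 1)) + 1 by omega]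
      rfl
    · have hAmat : PySem.List.pyGet? ((l.map (padbits R)).take k.toNat) (t : Int) = none := by
        rw [PySem.List.pyGet?_natCast]
        apply List.getElem?_eq_none
        simp; omega
      rw [hAmat]
      simp only [Option.bind_none]
      rw [foldl_bind_none]
      rw [List.drop_eq_nil_of_le (by omega)]
      rw [show k.toNat - t = (k.toNat - (t + 1)) + 1 by omega]
      rfl

theorem b_loop (R : Nat) (k : Int) (hk : 0 ≤ k) :
    ∀ (fuel i p ident : Nat) (acc : List (List Int)),
      fuel = 2 ^ R - i → 3 ≤ i → i ≤ 2 ^ R → (∃ e, p = 2 ^ e) → i ≤ p → p < 2 * i →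
    genRows R (2 ^ R) k i p ident acc
      = buildFrom R k.toNat ident (csList R i) (k.toNat - ident) acc := by
  intro fuel
  induction fuel with
  | zero =>
    intro i p ident acc hf h3 hle hp hip hpi
    rw [genRows]
    by_cases hk' : (ident : Int) < k
    · rw [if_pos hk', dif_pos (by omega)]
      have hcs : csList R i = [] := by
        unfold csList
        rw [show 2 ^ R - i = 0 by omega]
        rfl
      rw [hcs, show k.toNat - ident = (k.toNat - ident - 1) + 1 by omega]
      rfl
    · rw [if_neg hk', show k.toNat - ident = 0 by omega]
      rfl
  | succ fuel ih =>
    intro i p ident acc hf h3 hle hp hip hpi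
    have hilt : i < 2 ^ R := by omega
    have hcs : csList R i
        = if (PySem.List.count (padbits R i) 1 ≠ 1 : Bool) then i :: csList R (i + 1)
          else csList R (i + 1) := by
      unfold csList
      rw [show 2 ^ R - i = (2 ^ R - (i + 1)) + 1 by omega, List.range'_succ, List.filter_cons]
    rw [genRows]
    by_cases hk' : (ident : Int) < k
    · rw [if_pos hk', dif_neg (by omega)]
      by_cases hip2 : i = p
      · -- i is the tracked power of two: its digits have exactly one 1, A filters it too
        obtain ⟨e, hpe⟩ := hp
        have h1 : List.count (1 : Int) (pybin i) = 1 :=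
          (pybin_count_one_iff i (by omega)).mpr ⟨e, by omega⟩
        have hcs2 : csList R i = csList R (i + 1) := by
          rw [hcs, if_neg (by simp [PySem.List.count_eq, padbits_count, h1])]
        rw [if_pos hip2, hcs2]
        exact ih (i + 1) (p * 2) ident acc (by omega) (by omega) (by omega)
          ⟨e + 1, by rw [pow_succ]; omega⟩ (by omega) (by omega)
      · -- i is not a power of two (no power lies strictly between p/2 and p)
        have hnotpow : ¬ ∃ j, i = 2 ^ j := by
          rintro ⟨j, rfl⟩
          obtain ⟨e, hpe⟩ := hp
          have he1 : j ≤ e := by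
            have := hip; rw [hpe] at this
            exact (Nat.pow_le_pow_iff_right (by norm_num)).mp this
          have he2 : e < j + 1 := by
            have := hpi; rw [hpe] at this
            have h2j : p < 2 ^ (j + 1) := by rw [pow_succ]; omega
            rw [hpe] at h2j
            exact (Nat.pow_lt_pow_iff_right (by norm_num)).mp h2j
          have hej : e = j := by omega
          exact hip2 (by rw [hpe, hej])
        have h1 : List.count (1 : Int) (pybin i) ≠ 1 := by
          intro hc
          exact hnotpow ((pybin_count_one_iff i (by omega)).mp hc)
        have hcs2 : csList R i = i :: csList R (i + 1) := by
          rw [hcs, if_pos (by simp [PySem.List.count_eq, padbits_count, h1])]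
        rw [if_neg hip2, hcs2,
          show k.toNat - ident = (k.toNat - (ident + 1)) + 1 by omega]
        have := ih (i + 1) p (ident + 1)
          (acc ++ [(List.replicate k.toNat (0 : Int)).set ident 1 ++ padbits R i])
          (by omega) (by omega) (by omega) hp (by omega) (by omega)
        rw [this]
        rfl
    · rw [if_neg hk', show k.toNat - ident = 0 by omega]
      rfl

theorem pybin_one : pybin 1 = [1] := by
  rw [pybin_ne_zero (by norm_num)]
  norm_num [pybin_zero]

theorem pybin_two : pybin 2 = [1, 0] := by
  rw [pybin_ne_zero (by norm_num)]
  norm_num [pybin_one]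

-- 1 and 2 are the first two basis (weight-1) vectors, so the candidates start at 3
theorem cs_one_three (R : Nat) (hR : 2 ≤ R) : csList R 1 = csList R 3 := by
  have h4 : (4 : Nat) ≤ 2 ^ R := by
    calc (4 : Nat) = 2 ^ 2 := by norm_num
    _ ≤ 2 ^ R := Nat.pow_le_pow_right (by norm_num) hR
  unfold csList
  rw [show 2 ^ R - 1 = ((2 ^ R - 3) + 1) + 1 by omega, List.range'_succ, List.range'_succ]
  rw [List.filter_cons, List.filter_cons]
  have hc1 : List.count (1 : Int) (padbits R 1) = 1 := by
    rw [padbits_count, pybin_one]; decide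
  have hc2 : List.count (1 : Int) (padbits R 2) = 1 := by
    rw [padbits_count, pybin_two]; decide
  simp [PySem.List.count_eq, hc1, hc2]

-- the index loop that drops the weight-1 rows is a filter over the vectors
theorem nonbasis_fold (vs : List (List Int)) :
    (PySem.List.pyRange 0 ((vs.map (fun row => PySem.List.count row 1)).length : Int)).foldl
      (fun acc i =>
        if PySem.List.pyGetD (vs.map (fun row => PySem.List.count row 1)) i 0 ≠ 1 then
          acc ++ [PySem.List.pyGetD vs i []]
        else acc) []
    = vs.filter (fun v => decide (PySem.List.count v 1 ≠ 1)) := by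
  have hmap : ∀ i, PySem.List.pyGetD (vs.map (fun row => PySem.List.count row 1)) i 0
      = PySem.List.count (PySem.List.pyGetD vs i []) 1 :=
    fun i => PySem.List.pyGetD_map (fun row => PySem.List.count row 1) vs i []
  simp only [hmap, List.length_map]
  rw [PySem.List.foldl_pyRange_zero_pyGetD' vs []
    (fun acc v => if PySem.List.count v 1 ≠ 1 then acc ++ [v] else acc) []]
  simpa using PySem.List.foldl_append_ite_eq_filter
    (fun v => PySem.List.count v 1 ≠ 1) vs []

theorem a_side (n k : Int) (hr : ¬ n - k < 2) (hk : 1 ≤ k) :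
    generate_G n k
      = buildFrom (n - k).toNat k.toNat 0 (csList (n - k).toNat 1) k.toNat [] := by
  unfold generate_G
  rw [if_neg hr]
  dsimp only
  set R := (n - k).toNat with hRdef
  have hR2 : 2 ≤ R := by omega
  have hpow1 : (1 : Nat) ≤ 2 ^ R := Nat.one_le_two_pow
  have hav : (PySem.List.pyRange 1 ((2 : Int) ^ R)).map (fun i => padbits R i.toNat)
      = (List.range' 1 (2 ^ R - 1)).map (padbits R) := by
    have hM : ((2 : Int) ^ R - 1).toNat = 2 ^ R - 1 := by
      have h2R : (2 : Int) ^ R = ((2 ^ R : Nat) : Int) := by push_cast; ring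
      omega
    rw [PySem.List.pyRange_one, List.map_map, hM, List.range'_eq_map_range, List.map_map]
    apply List.map_congr_left
    intro t _
    simp only [Function.comp]
    congr 1
  rw [hav, nonbasis_fold, List.filter_map]
  simp only [Function.comp_def]
  rw [PySem.List.slice_to _ (by omega)]
  have hl : ∀ m ∈ (List.range' 1 (2 ^ R - 1)).filter
      (fun m => decide (PySem.List.count (padbits R m) 1 ≠ 1)), (padbits R m).length = R := by
    intro m hm
    have hmr := List.mem_range'_1.mp (List.mem_filter.mp hm).1
    exact padbits_length (by omega)
  have harl := a_rows_loop k n hk R (by omega)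
    ((List.range' 1 (2 ^ R - 1)).filter
      (fun m => decide (PySem.List.count (padbits R m) 1 ≠ 1)))
    hl k.toNat 0 [] (by omega) (by omega)
  simp only [Nat.cast_zero, List.drop_zero, Nat.sub_zero] at harl
  rw [show n - k = ((R : Nat) : Int) by omega]
  rw [harl]
  rfl

theorem b_side (n k : Int) (hr : ¬ n - k < 2) (hk : 0 ≤ k) :
    generate_G_alt n k
      = buildFrom (n - k).toNat k.toNat 0 (csList (n - k).toNat 3) k.toNat [] := by
  unfold generate_G_alt
  rw [if_neg hr]
  have h4 : (4 : Nat) ≤ 2 ^ (n - k).toNat := by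
    calc (4 : Nat) = 2 ^ 2 := by norm_num
    _ ≤ 2 ^ (n - k).toNat := Nat.pow_le_pow_right (by norm_num) (by omega)
  have hb := b_loop (n - k).toNat k hk (2 ^ (n - k).toNat - 3) 3 4 0 []
    rfl (by omega) (by omega) ⟨2, rfl⟩ (by omega) (by omega)
  simpa using hb

-- ===== VERDICT (by name: the statement is the Claim_ definition above) =====
theorem generate_G_spec : Claim_equal_generate_G := by
  intro n k _ _
  unfold Spec_generate_G
  by_cases hr : n - k < 2
  · simp [generate_G, generate_G_alt, hr]
  · by_cases hk : 1 ≤ k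
    · rw [a_side n k hr hk, b_side n k hr (by omega), cs_one_three _ (by omega)]
    · have hA : generate_G n k = some [] := by
        unfold generate_G
        rw [if_neg hr]
        dsimp only
        rw [PySem.List.pyRange_one_eq_nil (show k ≤ 0 by omega)]
        rfl
      have hB : generate_G_alt n k = some [] := by
        unfold generate_G_alt
        rw [if_neg hr]
        rw [genRows]
        rw [if_neg (show ¬ ((0 : Nat) : Int) < k by push_cast; omega)]
      rw [hA, hB]
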